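-- pv_equiv track=rewrite | github.com/jwasinger/py-evmmax | arith.py | addmod
-- ===== SOURCE A (Python) =====
-- LIMB_SIZE = 8
--
-- BASE = 1 << 64
--
-- def limbs_gte(x, y) -> bool:
--     assert len(x) == len(y), "x and y should have same number of limbs"
--
--     for (x_limb, y_limb) in reversed(list(zip(x,y))):
--         if x_limb > y_limb:
--             return True
--         elif x_limb < y_limb:
--             return False
--
--     return True
--
-- def hi_lo(double_word: int, word_size: int) -> (int, int):
--     assert double_word < (1<<(word_size * 8 * 2)), "val must fit in two words"
--     base = 1 << (word_size * 8)
--     return (double_word >> (word_size * 8)) % base, double_word % base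
--
-- def sub_with_borrow(x: int, y: int, b: int, word_size: int) -> (int, int):
--     assert b == 0 or b == 1, "borrow in must be zero or one"
--
--     res = x - y - b
--     b_out = 0
--     if res < 0:
--         res = BASE - abs(res)
--         b_out = 1
--
--     return b_out, res
--
-- def addmod(x: [int], y: [int], mod: [int], word_size: int) -> [int]:
--     assert len(x) == len(y) and len(y) == len(mod), "bignum inputs must have same length"
--     limb_count = len(mod)
--     tmp = [0] * limb_count
--     z = [0] * limb_count
--     c, c1 = 0, 0
--
--     if limbs_gte(x, mod) or limbs_gte(y, mod):
--         raise Exception("x/y must be less than the modulus")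
--
--     for i in range(limb_count):
--         c, tmp[i] = hi_lo(x[i] + y[i] + c, LIMB_SIZE)
--
--     for i in range(limb_count):
--         c1, z[i] = sub_with_borrow(tmp[i], mod[i], c1, LIMB_SIZE)
--
--     if c == 0 and c1 != 0:
--         z[:] = tmp[:]
--
--     return z
-- ===== SOURCE B (Python) =====
-- BASE = 1 << 64
--
--
-- def addmod(x, y, mod, word_size):
--     assert len(x) == len(y) and len(y) == len(mod), "bignum inputs must have same length"
--
--     def decode(limbs):
--         # balanced split keeps the big-integer additions cheap
--         if len(limbs) <= 1:
--             return limbs[0] if limbs else 0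
--         k = len(limbs) // 2
--         return decode(limbs[:k]) + (decode(limbs[k:]) << (64 * k))
--
--     if decode(x) >= decode(mod) or decode(y) >= decode(mod):
--         raise Exception("x/y must be less than the modulus")
--
--     tmp = []
--     z = []
--     carry = borrow = 0
--     for xi, yi, mi in zip(x, y, mod):
--         carry, t = divmod(xi + yi + carry, BASE)
--         carry %= BASE  # the carry register is a single 64-bit word
--         tmp.append(t)
--         r = t - mi - borrow
--         if r < 0:
--             r += BASE
--             borrow = 1
--         else:
--             borrow = 0
--         z.append(r)
--     return tmp if carry == 0 and borrow else z
-- ===== Notes on version B (the rewrite author's own statement) =====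
-- stated objective: alternative
-- what changed: B replaces A's two reversed lexicographic limb-comparison loops for the guard by decoding x, y, mod once to big integers and comparing them directly, and fuses A's two separate passes (hi_lo carry addition, then sub_with_borrow subtraction) with their helper functions into a single loop over zip(x, y, mod) using divmod word arithmetic.
import Mathlib
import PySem

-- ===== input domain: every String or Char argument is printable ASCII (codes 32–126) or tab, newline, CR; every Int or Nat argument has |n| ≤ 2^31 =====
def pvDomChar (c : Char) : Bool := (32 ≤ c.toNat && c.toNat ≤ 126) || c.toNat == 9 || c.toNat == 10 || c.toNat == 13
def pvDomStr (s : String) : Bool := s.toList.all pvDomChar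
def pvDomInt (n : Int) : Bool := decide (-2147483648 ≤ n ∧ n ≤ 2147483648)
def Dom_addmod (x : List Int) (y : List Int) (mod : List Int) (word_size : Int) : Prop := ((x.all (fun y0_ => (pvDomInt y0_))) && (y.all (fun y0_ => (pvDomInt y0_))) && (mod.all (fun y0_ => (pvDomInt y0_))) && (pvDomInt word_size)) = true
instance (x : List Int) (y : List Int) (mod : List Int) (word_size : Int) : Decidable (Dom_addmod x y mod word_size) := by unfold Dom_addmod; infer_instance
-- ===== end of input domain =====

-- B decodes the limb vectors to big integers once and compares them directly for the guard
-- (instead of A's reversed lexicographic scans), and fuses A's two limb passes and their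
-- helpers into a single divmod loop over zip(x, y, mod) (objective: alternative).

-- ===== PORT A =====
def pyBASE : Int := 18446744073709551616   -- BASE = 1 << 64

-- loop of limbs_gte over reversed(list(zip(x, y)))
def limbsGteGo : List (Int × Int) → Bool
  | [] => true
  | (a, b) :: rest => if a > b then true else if a < b then false else limbsGteGo rest

def limbsGte (x y : List Int) : Bool := limbsGteGo ((x.zip y).reverse)

-- hi_lo (the assert holds on every admitted input)
def hiLo (d ws : Int) : Int × Int :=
  let base : Int := 2 ^ (ws * 8).toNat
  (PySem.Int.mod (PySem.Int.floordiv d base) base, PySem.Int.mod d base)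

def subWithBorrow (x y b _ws : Int) : Int × Int :=
  let res := x - y - b
  if res < 0 then (1, pyBASE - |res|) else (0, res)

-- first loop of addmod: carry in, produces (carry out, tmp limbs)
def addLoop : List Int → List Int → Int → Int × List Int
  | xi :: xs, yi :: ys, c =>
    let p := hiLo (xi + yi + c) 8
    let r := addLoop xs ys p.1
    (r.1, p.2 :: r.2)
  | _, _, c => (c, [])

-- second loop of addmod: borrow in, produces (borrow out, z limbs)
def subLoop : List Int → List Int → Int → Int × List Int
  | ti :: ts, mi :: ms, b =>
    let p := subWithBorrow ti mi b 8
    let r := subLoop ts ms p.1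
    (r.1, p.2 :: r.2)
  | _, _, b => (b, [])

def addmod (x : List Int) (y : List Int) (mod : List Int) (word_size : Int) : List Int :=
  if limbsGte x mod || limbsGte y mod then []   -- Python raises Exception here (outside Pre_)
  else
    let ct := addLoop x y 0
    let cz := subLoop ct.2 mod 0
    if ct.1 == 0 && cz.1 != 0 then ct.2 else cz.2

-- ===== PORT B =====
-- def decode(limbs): balanced recursive split; limbs[:k]/limbs[k:] with 0 ≤ k ≤ len are
-- exactly List.take/List.drop, and `<< (64*k)` on a Python int is `* 2 ^ (64*k)`
def decodeLimbs (l : List Int) : Int :=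
  if _h : l.length ≤ 1 then
    match l with
    | [] => 0
    | a :: _ => a
  else
    let k := l.length / 2
    decodeLimbs (l.take k) + decodeLimbs (l.drop k) * 2 ^ (64 * k)
termination_by l.length
decreasing_by
  · simp; omega
  · simp; omega

-- the fused loop over zip(x, y, mod): returns (carry, borrow, tmp, z)
def fusedLoop : List Int → List Int → List Int → Int → Int → Int × Int × List Int × List Int
  | xi :: xs, yi :: ys, mi :: ms, carry, borrow =>
    let q := PySem.Int.floordiv (xi + yi + carry) pyBASE     -- carry, t = divmod(..., BASE)
    let t := PySem.Int.mod (xi + yi + carry) pyBASE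
    let c' := PySem.Int.mod q pyBASE                         -- carry %= BASE
    let r := t - mi - borrow
    let zi := if r < 0 then r + pyBASE else r
    let b' := if r < 0 then (1 : Int) else 0
    let rest := fusedLoop xs ys ms c' b'
    (rest.1, rest.2.1, t :: rest.2.2.1, zi :: rest.2.2.2)
  | _, _, _, carry, borrow => (carry, borrow, [], [])

def addmod_alt (x : List Int) (y : List Int) (mod : List Int) (word_size : Int) : List Int :=
  if decodeLimbs mod ≤ decodeLimbs x ∨ decodeLimbs mod ≤ decodeLimbs y then []   -- Python raises Exception here (outside Pre_)
  else
    let res := fusedLoop x y mod 0 0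
    if res.1 == 0 && res.2.1 != 0 then res.2.2.1 else res.2.2.2

-- ===== PRECONDITION & SPEC =====
-- plain little-endian decoding, used to state the precondition
def decodeLE (l : List Int) : Int := l.foldr (fun limb acc => acc * pyBASE + limb) 0

-- Pre_ excludes exactly the inputs where A raises: mismatched limb counts (AssertionError) and
-- x >= mod or y >= mod as bignums (Exception; this also covers the empty limb lists).
def Pre_addmod (x : List Int) (y : List Int) (mod : List Int) (word_size : Int) : Prop :=
  x.length = mod.length ∧ y.length = mod.length ∧
  decodeLE x < decodeLE mod ∧ decodeLE y < decodeLE mod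

instance (x : List Int) (y : List Int) (mod : List Int) (word_size : Int) : Decidable (Pre_addmod x y mod word_size) := by unfold Pre_addmod; infer_instance

def pvWitness_addmod : List Int × List Int × List Int × Int := ([1, 2], [3, 4], [5, 6], 8)

def Spec_addmod (x : List Int) (y : List Int) (mod : List Int) (word_size : Int) (out : List Int) : Prop := out = addmod_alt x y mod word_size
instance (x : List Int) (y : List Int) (mod : List Int) (word_size : Int) (out : List Int) : Decidable (Spec_addmod x y mod word_size out) := by unfold Spec_addmod; infer_instance

-- ===== CLAIM (what is proved, stated in full; the proofs are below) =====
def Claim_equal_addmod : Prop := ∀ (x : List Int) (y : List Int) (mod : List Int) (word_size : Int), Dom_addmod x y mod word_size → Pre_addmod x y mod word_size → Spec_addmod x y mod word_size (addmod x y mod word_size)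

-- ===== LEMMAS AND PROOFS =====

theorem decode_nil : decodeLE [] = 0 := rfl

theorem decode_cons (a : Int) (l : List Int) :
    decodeLE (a :: l) = decodeLE l * pyBASE + a := rfl

theorem decodeLE_append (l1 l2 : List Int) :
    decodeLE (l1 ++ l2) = decodeLE l1 + decodeLE l2 * pyBASE ^ l1.length := by
  induction l1 with
  | nil => simp [decode_nil]
  | cons a t ih =>
    simp only [List.cons_append, decode_cons, ih, List.length_cons, pow_succ]
    ring

-- B's balanced decode computes the plain little-endian value
theorem decodeLimbs_eq_aux (n : Nat) : ∀ l : List Int, l.length ≤ n → decodeLimbs l = decodeLE l := by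
  induction n with
  | zero =>
    intro l h
    have : l = [] := by cases l <;> simp_all
    subst this; simp [decodeLimbs, decodeLE]
  | succ n ih =>
    intro l hl
    by_cases h : l.length ≤ 1
    · rw [decodeLimbs, dif_pos h]
      cases l with
      | nil => rfl
      | cons a t =>
        have ht : t = [] := by cases t <;> simp_all
        subst ht; simp [decode_cons, decode_nil]
    · rw [decodeLimbs, dif_neg h]
      show decodeLimbs (List.take (l.length / 2) l)
          + decodeLimbs (List.drop (l.length / 2) l) * 2 ^ (64 * (l.length / 2)) = decodeLE l
      have h1 : (l.take (l.length / 2)).length ≤ n := by simp; omega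
      have h2 : (l.drop (l.length / 2)).length ≤ n := by simp; omega
      rw [ih _ h1, ih _ h2]
      have hkl : (l.take (l.length / 2)).length = l.length / 2 := by simp; omega
      have hpow : (2:Int) ^ (64 * (l.length / 2)) = pyBASE ^ (l.length / 2) := by
        rw [show pyBASE = (2:Int) ^ (64:Nat) by decide, ← pow_mul]
      have happ := decodeLE_append (l.take (l.length / 2)) (l.drop (l.length / 2))
      rw [List.take_append_drop] at happ
      rw [happ, hkl, hpow]

theorem decodeLimbs_eq (l : List Int) : decodeLimbs l = decodeLE l :=
  decodeLimbs_eq_aux l.length l le_rfl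

-- the lexicographic scan from the most significant limb decides the integer comparison,
-- provided corresponding limbs differ by less than the base
theorem lgte_append (as bs : List Int) (M : List (Int × Int)) (hlen : as.length = bs.length)
    (hd : ∀ p ∈ as.zip bs, p.1 - p.2 < pyBASE ∧ p.2 - p.1 < pyBASE) :
    limbsGteGo ((as.zip bs).reverse ++ M) =
      if decodeLE bs < decodeLE as then true
      else if decodeLE as < decodeLE bs then false
      else limbsGteGo M := by
  induction as generalizing bs M with
  | nil =>
    cases bs with
    | nil => simp [decode_nil]
    | cons b bt => simp at hlen
  | cons a at_ ih =>
    cases bs with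
    | nil => simp at hlen
    | cons b bt =>
      have hab := hd (a, b) (by simp)
      have hrec := ih bt ((a, b) :: M) (by simpa using hlen)
        (fun p hp => hd p (List.mem_cons_of_mem _ hp))
      have hzip : ((a :: at_).zip (b :: bt)).reverse ++ M
          = (at_.zip bt).reverse ++ ((a, b) :: M) := by
        simp
      rw [hzip, hrec, decode_cons, decode_cons]
      simp only [limbsGteGo]
      unfold pyBASE at *
      split_ifs <;> first | rfl | omega

theorem limbsGte_eq (x m : List Int) (hlen : x.length = m.length)
    (hd : ∀ p ∈ x.zip m, p.1 - p.2 < pyBASE ∧ p.2 - p.1 < pyBASE) :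
    limbsGte x m = decide (decodeLE m ≤ decodeLE x) := by
  have := lgte_append x m [] hlen hd
  simp only [List.append_nil] at this
  unfold limbsGte
  rw [this]
  split_ifs with h1 h2
  · exact (decide_eq_true (le_of_lt h1)).symm
  · exact (decide_eq_false (by omega)).symm
  · have h3 : decodeLE m ≤ decodeLE x := by omega
    simp [limbsGteGo, h3]

-- B's single fused loop computes exactly A's two passes: the divmod quotient reduced to a word
-- is A's hi_lo high word, the remainder is its low word, and the borrow step is sub_with_borrow
theorem fused_eq (x y m : List Int) (c b : Int)
    (hl1 : x.length = y.length) (hl2 : y.length = m.length) :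
    (fusedLoop x y m c b).1 = (addLoop x y c).1 ∧
    (fusedLoop x y m c b).2.2.1 = (addLoop x y c).2 ∧
    (fusedLoop x y m c b).2.1 = (subLoop (addLoop x y c).2 m b).1 ∧
    (fusedLoop x y m c b).2.2.2 = (subLoop (addLoop x y c).2 m b).2 := by
  induction x generalizing y m c b with
  | nil =>
    cases y with
    | cons _ _ => simp at hl1
    | nil =>
      cases m with
      | cons _ _ => simp at hl2
      | nil => exact ⟨rfl, rfl, rfl, rfl⟩
  | cons xi xs ih =>
    cases y with
    | nil => simp at hl1
    | cons yi ys =>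
      cases m with
      | nil => simp at hl2
      | cons mi ms =>
        have hhiLo : hiLo (xi + yi + c) 8
            = (PySem.Int.mod (PySem.Int.floordiv (xi + yi + c) pyBASE) pyBASE,
               PySem.Int.mod (xi + yi + c) pyBASE) := by
          simp only [hiLo]
          have h64 : ((8:Int) * 8).toNat = 64 := by decide
          have hBeq : (2:Int) ^ (64:Nat) = pyBASE := by decide
          rw [h64, hBeq]
        have hsub : ∀ t bb : Int, subWithBorrow t mi bb 8
            = (if t - mi - bb < 0 then (1:Int) else 0,
               if t - mi - bb < 0 then t - mi - bb + pyBASE else t - mi - bb) := by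
          intro t bb
          simp only [subWithBorrow]
          split_ifs with h
          · rw [abs_of_neg h, Prod.mk.injEq]; exact ⟨rfl, by ring⟩
          · rfl
        have hrec := ih ys ms
          (PySem.Int.mod (PySem.Int.floordiv (xi + yi + c) pyBASE) pyBASE)
          (if PySem.Int.mod (xi + yi + c) pyBASE - mi - b < 0 then (1:Int) else 0)
          (by simpa using hl1) (by simpa using hl2)
        simp only [fusedLoop, addLoop, subLoop, hhiLo, hsub]
        exact ⟨hrec.1, by rw [hrec.2.1], hrec.2.2.1, by rw [hrec.2.2.2]⟩

-- ===== VERDICT (by name: the statement is the Claim_ definition above) =====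
theorem addmod_spec : Claim_equal_addmod := by
  intro x y mod word_size hdom hpre
  obtain ⟨hlx, hly, hxm, hym⟩ := hpre
  simp only [Dom_addmod, Bool.and_eq_true, List.all_eq_true, pvDomInt,
    decide_eq_true_eq] at hdom
  obtain ⟨⟨⟨hdx, hdy⟩, hdm⟩, -⟩ := hdom
  -- A's lexicographic guards decide the integer comparisons; both guards are false on Pre_
  have hg1 : limbsGte x mod = false := by
    rw [limbsGte_eq x mod hlx (fun p hp => by
      obtain ⟨h1, h2⟩ := List.of_mem_zip hp
      have := hdx p.1 h1; have := hdm p.2 h2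
      unfold pyBASE; omega)]
    simp; omega
  have hg2 : limbsGte y mod = false := by
    rw [limbsGte_eq y mod hly (fun p hp => by
      obtain ⟨h1, h2⟩ := List.of_mem_zip hp
      have := hdy p.1 h1; have := hdm p.2 h2
      unfold pyBASE; omega)]
    simp; omega
  unfold Spec_addmod addmod addmod_alt
  rw [hg1, hg2, decodeLimbs_eq, decodeLimbs_eq, decodeLimbs_eq]
  norm_num
  rw [if_neg (show ¬(decodeLE mod ≤ decodeLE x ∨ decodeLE mod ≤ decodeLE y) by omega)]
  -- the fused loop computes A's two passes
  have hfe := fused_eq x y mod 0 0 (by omega) (by omega)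
  rw [hfe.1, hfe.2.1, hfe.2.2.1, hfe.2.2.2]
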